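-- pv_equiv track=rewrite | github.com/bhengubv/dataacuity | api-gateway/shared/auth.py | check_scope
-- ===== SOURCE A (Python) =====
-- def check_scope(required_scope: str, granted_scopes: list) -> bool:
--     """
--     Check if a required scope is satisfied by granted scopes
--     Supports wildcard matching (e.g., "markets:*" matches "markets:read")
--     """
--     if not granted_scopes:
--         return False
--
--     if "*" in granted_scopes:
--         return True
--
--     for scope in granted_scopes:
--         if scope == required_scope:
--             return True
--         # Wildcard matching
--         if scope.endswith(":*"):
--             prefix = scope[:-1]  # Remove the *
--             if required_scope.startswith(prefix):
--                 return True
--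
--     return False
-- ===== SOURCE B (Python) =====
-- def check_scope(required_scope: str, granted_scopes: list) -> bool:
--     """Invert the matching: compute every granted value that would satisfy
--     required_scope ('*', the scope itself, and prefix+'*' for each ':' boundary)
--     and test those candidates against a set of the granted scopes."""
--     granted = set(granted_scopes)
--     candidates = {"*", required_scope}
--     for i, ch in enumerate(required_scope):
--         if ch == ":":
--             candidates.add(required_scope[:i + 1] + "*")
--     return any(c in granted for c in candidates)
-- ===== Notes on version B (the rewrite author's own statement) =====
-- stated objective: alternative
-- what changed: Instead of scanning granted_scopes and pattern-matching each entry against required_scope, B enumerates the candidate granted values that could satisfy required_scope ('*', the scope itself, and prefix+'*' at each ':' boundary) and tests them for membership in a set built once from granted_scopes.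
import Mathlib
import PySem

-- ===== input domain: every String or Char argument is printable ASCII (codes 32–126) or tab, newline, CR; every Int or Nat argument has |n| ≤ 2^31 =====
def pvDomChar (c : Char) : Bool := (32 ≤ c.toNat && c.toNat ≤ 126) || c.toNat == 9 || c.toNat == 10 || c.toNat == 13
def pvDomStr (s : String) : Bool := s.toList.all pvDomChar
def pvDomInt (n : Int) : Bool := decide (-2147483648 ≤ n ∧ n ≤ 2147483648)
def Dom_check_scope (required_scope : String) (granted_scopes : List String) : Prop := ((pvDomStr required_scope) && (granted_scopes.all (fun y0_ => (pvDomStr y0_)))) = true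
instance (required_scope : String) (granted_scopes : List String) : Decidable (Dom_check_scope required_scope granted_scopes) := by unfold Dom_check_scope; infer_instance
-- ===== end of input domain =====

-- B inverts the matching: it enumerates the candidate granted values that would satisfy
-- required_scope and tests them against a set of the granted scopes (alternative decomposition).

-- ===== PORT A =====
-- the 'for scope in granted_scopes' loop with its early returns
def checkScopeLoop (required_scope : String) : List String → Bool
  | [] => false
  | scope :: rest =>
    if scope = required_scope then true
    else if PySem.Str.endswith scope ":*" then
      (if PySem.Str.startswith required_scope (PySem.Str.slice scope none (some (-1))) then true
       else checkScopeLoop required_scope rest)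
    else checkScopeLoop required_scope rest

def check_scope (required_scope : String) (granted_scopes : List String) : Bool :=
  if granted_scopes = [] then false
  else if "*" ∈ granted_scopes then true
  else checkScopeLoop required_scope granted_scopes

-- ===== PORT B =====
def check_scope_alt (required_scope : String) (granted_scopes : List String) : Bool :=
  let granted : PySem.Set String := PySem.Set.ofList granted_scopes
  let init : PySem.Set String := PySem.Set.add (PySem.Set.add PySem.Set.empty "*") required_scope
  let candidates : PySem.Set String :=
    (PySem.List.enumerate required_scope.toList 0).foldl
      (fun cs p =>
        if p.2 = ':' then
          -- required_scope[:i + 1] + "*", computed exactly on the code-point list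
          PySem.Set.add cs
            (String.ofList (PySem.List.slice required_scope.toList none (some (p.1 + 1)) ++ ['*']))
        else cs) init
  candidates.any (fun c => PySem.Set.contains granted c)

-- ===== PRECONDITION & SPEC =====
def Spec_check_scope (required_scope : String) (granted_scopes : List String) (out : Bool) : Prop := out = check_scope_alt required_scope granted_scopes
instance (required_scope : String) (granted_scopes : List String) (out : Bool) : Decidable (Spec_check_scope required_scope granted_scopes out) := by unfold Spec_check_scope; infer_instance

-- ===== CLAIM (what is proved, stated in full; the proofs are below) =====
def Claim_equal_check_scope : Prop := ∀ (required_scope : String) (granted_scopes : List String), Dom_check_scope required_scope granted_scopes → Spec_check_scope required_scope granted_scopes (check_scope required_scope granted_scopes)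

-- ===== LEMMAS AND PROOFS =====

-- the wildcard-match test A applies to a single granted scope, read on the char lists
lemma core_match_iff (sl rl : List Char) :
    ([':', '*'] <:+ sl ∧ sl.dropLast <+: rl) ↔
      ∃ k, ∃ _ : k < rl.length, rl[k] = ':' ∧ sl = rl.take (k + 1) ++ ['*'] := by
  constructor
  · rintro ⟨⟨t, ht⟩, hpre⟩
    have hsl : sl = (t ++ [':']) ++ ['*'] := by simpa using ht.symm
    have hdrop : sl.dropLast = t ++ [':'] := by
      rw [hsl, List.dropLast_concat]
    rw [hdrop] at hpre
    obtain ⟨u, hu⟩ := hpre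
    refine ⟨t.length, by simp [← hu], ?_, ?_⟩
    · have hlen : t.length < rl.length := by simp [← hu]
      have h9 : rl[t.length]? = some ':' := by
        rw [← hu]
        simp
      rw [List.getElem?_eq_getElem hlen] at h9
      exact Option.some.inj h9
    · have htake : rl.take (t.length + 1) = t ++ [':'] := by
        have : rl.take (t ++ [':']).length = t ++ [':'] := by
          rw [← hu]; exact List.take_left
        simpa using this
      rw [htake, ← hsl]
  · rintro ⟨k, hk, hcolon, hsl⟩
    have htake : rl.take (k + 1) = rl.take k ++ [rl[k]] := by
      rw [List.take_add_one, List.getElem?_eq_getElem hk]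
      simp
    constructor
    · refine ⟨rl.take k, ?_⟩
      rw [hsl, htake, hcolon]
      simp
    · rw [hsl, List.dropLast_concat]
      exact List.take_prefix _ _

-- membership in the candidate set B builds by folding Set.add over the filtered pairs
lemma mem_foldl_add (f : Int × Char → String) (l : List (Int × Char)) (acc : PySem.Set String)
    (s : String) :
    s ∈ l.foldl (fun cs p => if p.2 = ':' then PySem.Set.add cs (f p) else cs) acc ↔
      s ∈ acc ∨ ∃ p ∈ l, p.2 = ':' ∧ s = f p := by
  induction l generalizing acc with
  | nil => simp
  | cons p l ih =>
    simp only [List.foldl_cons]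
    by_cases hp : p.2 = ':'
    · rw [hp, if_pos rfl, ih, PySem.Set.mem_add]
      constructor
      · rintro (⟨h | h⟩ | ⟨q, hq, hq2, hs⟩)
        · exact Or.inl h
        · exact Or.inr ⟨p, by simp, hp, h⟩
        · exact Or.inr ⟨q, by simp [hq], hq2, hs⟩
      · rintro (h | ⟨q, hq, hq2, hs⟩)
        · exact Or.inl (Or.inl h)
        · rcases List.mem_cons.mp hq with rfl | hq
          · exact Or.inl (Or.inr hs)
          · exact Or.inr ⟨q, hq, hq2, hs⟩
    · rw [if_neg hp, ih]
      constructor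
      · rintro (h | ⟨q, hq, hq2, hs⟩)
        · exact Or.inl h
        · exact Or.inr ⟨q, by simp [hq], hq2, hs⟩
      · rintro (h | ⟨q, hq, hq2, hs⟩)
        · exact Or.inl h
        · rcases List.mem_cons.mp hq with rfl | hq
          · exact absurd hq2 hp
          · exact Or.inr ⟨q, hq, hq2, hs⟩

-- what B returns, as an existential over the granted scopes
lemma alt_true_iff (r : String) (g : List String) :
    check_scope_alt r g = true ↔
      ∃ s ∈ g, s = "*" ∨ s = r ∨
        ∃ k, ∃ _ : k < r.toList.length, r.toList[k] = ':' ∧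
          s.toList = r.toList.take (k + 1) ++ ['*'] := by
  unfold check_scope_alt
  simp only [List.any_eq_true]
  constructor
  · rintro ⟨c, hc, hcg⟩
    have hcg' : c ∈ g := by
      have := (PySem.Set.mem_ofList (xs := g) (y := c))
      simp only [PySem.Set.contains, List.contains_iff_mem] at hcg
      exact this.mp hcg
    rw [mem_foldl_add] at hc
    refine ⟨c, hcg', ?_⟩
    rcases hc with h | ⟨p, hp, hp2, hs⟩
    · rcases (PySem.Set.mem_add _ _ _).mp h with h | h
      · rcases (PySem.Set.mem_add _ _ _).mp h with h | h
        · simp [PySem.Set.empty] at h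
        · exact Or.inl h
      · exact Or.inr (Or.inl h)
    · rw [PySem.List.mem_enumerate_iff] at hp
      obtain ⟨k, hk, rfl⟩ := hp
      refine Or.inr (Or.inr ⟨k, hk, hp2, ?_⟩)
      rw [hs]
      simp only [String.toList_ofList]
      have : ((0 : Int) + k) + 1 = ((k + 1 : Nat) : Int) := by push_cast; ring
      rw [this, PySem.List.slice_to_natCast]
  · rintro ⟨s, hsg, hs⟩
    refine ⟨s, ?_, ?_⟩
    · rw [mem_foldl_add]
      rcases hs with rfl | rfl | ⟨k, hk, hcolon, hsl⟩
      · exact Or.inl ((PySem.Set.mem_add _ _ _).mpr (Or.inl ((PySem.Set.mem_add _ _ _).mpr (Or.inr rfl))))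
      · exact Or.inl ((PySem.Set.mem_add _ _ _).mpr (Or.inr rfl))
      · refine Or.inr ⟨((0 : Int) + k, r.toList[k]), ?_, hcolon, ?_⟩
        · rw [PySem.List.mem_enumerate_iff]; exact ⟨k, hk, rfl⟩
        · apply String.ext_iff.mpr
          simp only [String.toList_ofList]
          have : ((0 : Int) + k) + 1 = ((k + 1 : Nat) : Int) := by push_cast; ring
          rw [this, PySem.List.slice_to_natCast, hsl]
    · simp only [PySem.Set.contains, List.contains_iff_mem]
      exact (PySem.Set.mem_ofList (xs := g) (y := s)).mpr hsg

-- what A's inner loop returns, as an existential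
lemma loop_true_iff (r : String) (g : List String) :
    checkScopeLoop r g = true ↔
      ∃ s ∈ g, s = r ∨ ([':', '*'] <:+ s.toList ∧ s.toList.dropLast <+: r.toList) := by
  induction g with
  | nil => simp [checkScopeLoop]
  | cons s rest ih =>
    unfold checkScopeLoop
    by_cases h1 : s = r
    · simp [h1]
    · rw [if_neg h1]
      by_cases h2 : PySem.Str.endswith s ":*"
      · rw [if_pos h2]
        have hend : [':', '*'] <:+ s.toList := by
          have := (PySem.Chars.endswith_iff (s := s.toList) (p := (":*" : String).toList)).mp
            (by simpa using h2)
          simpa using this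
        by_cases h3 : PySem.Str.startswith r (PySem.Str.slice s none (some (-1)))
        · rw [if_pos h3]
          have hpre : s.toList.dropLast <+: r.toList := by
            have := (PySem.Chars.startswith_iff (s := r.toList)
              (p := (PySem.Str.slice s none (some (-1))).toList)).mp (by simpa using h3)
            rwa [PySem.Str.slice_to_neg_one] at this
          exact iff_of_true rfl ⟨s, by simp, Or.inr ⟨hend, hpre⟩⟩
        · rw [if_neg h3, ih]
          have hnpre : ¬ s.toList.dropLast <+: r.toList := by
            intro hc
            apply h3
            have : PySem.Chars.startswith r.toList (PySem.Str.slice s none (some (-1))).toList = true := by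
              rw [PySem.Chars.startswith_iff, PySem.Str.slice_to_neg_one]; exact hc
            simpa using this
          constructor
          · rintro ⟨t, ht, hmt⟩; exact ⟨t, by simp [ht], hmt⟩
          · rintro ⟨t, ht, hmt⟩
            rcases List.mem_cons.mp ht with rfl | ht
            · rcases hmt with h | ⟨_, hp⟩
              · exact absurd h h1
              · exact absurd hp hnpre
            · exact ⟨t, ht, hmt⟩
      · rw [if_neg h2, ih]
        have hnend : ¬ [':', '*'] <:+ s.toList := by
          intro hc
          apply h2
          have : PySem.Chars.endswith s.toList (":*" : String).toList = true := by
            rw [PySem.Chars.endswith_iff]; simpa using hc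
          simpa using this
        constructor
        · rintro ⟨t, ht, hmt⟩; exact ⟨t, by simp [ht], hmt⟩
        · rintro ⟨t, ht, hmt⟩
          rcases List.mem_cons.mp ht with rfl | ht
          · rcases hmt with h | ⟨he, _⟩
            · exact absurd h h1
            · exact absurd he hnend
          · exact ⟨t, ht, hmt⟩

lemma a_true_iff (r : String) (g : List String) :
    check_scope r g = true ↔
      ∃ s ∈ g, s = "*" ∨ s = r ∨ ([':', '*'] <:+ s.toList ∧ s.toList.dropLast <+: r.toList) := by
  unfold check_scope
  by_cases hnil : g = []
  · simp [hnil]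
  · rw [if_neg hnil]
    by_cases hstar : ("*" : String) ∈ g
    · simp only [if_pos hstar, true_iff]
      exact ⟨"*", hstar, Or.inl rfl⟩
    · rw [if_neg hstar, loop_true_iff]
      constructor
      · rintro ⟨s, hsg, hm⟩; exact ⟨s, hsg, Or.inr hm⟩
      · rintro ⟨s, hsg, hm⟩
        rcases hm with rfl | hm
        · exact absurd hsg hstar
        · exact ⟨s, hsg, hm⟩

-- ===== VERDICT (by name: the statement is the Claim_ definition above) =====
theorem check_scope_spec : Claim_equal_check_scope := by
  intro r g _
  unfold Spec_check_scope
  apply Bool.eq_iff_iff.mpr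
  rw [a_true_iff, alt_true_iff]
  constructor
  · rintro ⟨s, hsg, hm⟩
    refine ⟨s, hsg, ?_⟩
    rcases hm with h | h | h
    · exact Or.inl h
    · exact Or.inr (Or.inl h)
    · exact Or.inr (Or.inr ((core_match_iff s.toList r.toList).mp h))
  · rintro ⟨s, hsg, hm⟩
    refine ⟨s, hsg, ?_⟩
    rcases hm with h | h | h
    · exact Or.inl h
    · exact Or.inr (Or.inl h)
    · exact Or.inr (Or.inr ((core_match_iff s.toList r.toList).mpr h))
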